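-- pv_equiv track=rewrite | github.com/Nitin-Gahlawat/DataStructure-And-Algorithm | Array/DuplicateElement.py | duplicate_sorted
-- ===== SOURCE A (Python) =====
-- def duplicate_sorted(a :list[int])->dict[int,int]:
--     mapele={}
--     ct=1
--     for i in range(len(a)-1):
--         if(a[i]==a[i+1]):
--             ct=ct+1
--             mapele[a[i]]=ct
--         else:
--             ct=1
--     return mapele
-- ===== SOURCE B (Python) =====
-- def duplicate_sorted(a: list[int]) -> dict[int, int]:
--     # run-based: find each maximal run of consecutive equal values, record len >= 2
--     res = {}
--     i = 0
--     n = len(a)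
--     while i < n:
--         j = i + 1
--         while j < n and a[j] == a[i]:
--             j += 1
--         if j - i >= 2:
--             res[a[i]] = j - i
--         i = j
--     return res
-- ===== Notes on version B (the rewrite author's own statement) =====
-- stated objective: alternative
-- what changed: A scans adjacent index pairs carrying a running counter and rewriting the dict entry on every equal pair; B is a run-based two-pointer loop (hand-written groupby) that finds each maximal run of consecutive equal values and inserts its length once when it is >= 2.
import Mathlib
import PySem

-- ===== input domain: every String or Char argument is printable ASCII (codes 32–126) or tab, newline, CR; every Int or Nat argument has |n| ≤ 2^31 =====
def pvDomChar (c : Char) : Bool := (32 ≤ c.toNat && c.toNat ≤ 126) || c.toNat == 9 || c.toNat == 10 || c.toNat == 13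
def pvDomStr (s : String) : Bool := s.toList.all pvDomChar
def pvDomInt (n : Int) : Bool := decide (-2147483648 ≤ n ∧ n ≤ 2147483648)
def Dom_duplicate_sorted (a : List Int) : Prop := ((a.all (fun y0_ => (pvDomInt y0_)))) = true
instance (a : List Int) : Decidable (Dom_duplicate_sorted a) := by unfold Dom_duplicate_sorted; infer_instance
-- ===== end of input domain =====

-- B rewrites A's adjacent-pair scan with a running counter as an explicit run-based
-- two-pointer loop (hand-written groupby); alternative decomposition, same cost.

-- ===== PORT A =====
-- A's loop 'for i in range(len(a)-1)' compares a[i] with a[i+1]; ported as structural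
-- recursion over the list of consecutive pairs, carrying (mapele, ct) exactly as A does.
def dupA_go : List Int → PySem.Dict Int Int → Int → PySem.Dict Int Int
  | x :: y :: rest, m, ct =>
      if x = y then dupA_go (y :: rest) (m.insert x (ct + 1)) (ct + 1)
      else dupA_go (y :: rest) m 1
  | _, m, _ => m

def duplicate_sorted (a : List Int) : List (Int × Int) :=
  (dupA_go a PySem.Dict.empty 1).items

-- ===== PORT B =====
-- B's outer while loop: take the maximal run of the head, insert if its length ≥ 2,
-- continue after the run.
def dupB_go : List Int → PySem.Dict Int Int → PySem.Dict Int Int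
  | [], res => res
  | x :: xs, res =>
      let run := xs.takeWhile (fun y => y == x)
      let rest := xs.dropWhile (fun y => y == x)
      let n : Int := (run.length : Int) + 1
      dupB_go rest (if 2 ≤ n then res.insert x n else res)
termination_by l => l.length
decreasing_by
  simp only [List.length_cons]
  exact Nat.lt_succ_of_le (List.length_dropWhile_le _ _)

def duplicate_sorted_alt (a : List Int) : List (Int × Int) :=
  (dupB_go a PySem.Dict.empty).items

-- ===== PRECONDITION & SPEC =====
def Spec_duplicate_sorted (a : List Int) (out : List (Int × Int)) : Prop := out = duplicate_sorted_alt a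
instance (a : List Int) (out : List (Int × Int)) : Decidable (Spec_duplicate_sorted a out) := by unfold Spec_duplicate_sorted; infer_instance

-- ===== CLAIM (what is proved, stated in full; the proofs are below) =====
def Claim_equal_duplicate_sorted : Prop := ∀ (a : List Int), Dom_duplicate_sorted a → Spec_duplicate_sorted a (duplicate_sorted a)

-- ===== LEMMAS AND PROOFS =====

-- A's scan across a nonempty run of x's: it repeatedly overwrites m[x] with the growing
-- counter; the net effect is one insert with the final count.
theorem dupA_run (x : Int) :
    ∀ (run' : List Int), (∀ y ∈ run', y = x) →
    ∀ (rest : List Int) (m : PySem.Dict Int Int) (c : Int),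
      dupA_go (x :: ((x :: run') ++ rest)) m c =
        dupA_go (x :: rest) (m.insert x (c + 1 + (run'.length : Int))) (c + 1 + (run'.length : Int)) := by
  intro run'
  induction run' with
  | nil => intro _ rest m c; simp [dupA_go]
  | cons s t ih =>
      intro h rest m c
      have hs : s = x := h s (by simp)
      subst hs
      have ht : ∀ y ∈ t, y = s := fun y hy => h y (by simp [hy])
      show dupA_go (s :: s :: ((s :: t) ++ rest)) m c = _
      rw [show dupA_go (s :: s :: ((s :: t) ++ rest)) m c
            = dupA_go (s :: ((s :: t) ++ rest)) (m.insert s (c + 1)) (c + 1) by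
          simp [dupA_go]]
      rw [ih ht rest (m.insert s (c + 1)) (c + 1)]
      rw [PySem.Dict.insert_insert_self]
      have hv : c + 1 + 1 + ((t.length : ℕ) : Int) = c + 1 + (((s :: t).length : ℕ) : Int) := by
        simp only [List.length_cons]; push_cast; ring
      rw [hv]

theorem dupAB : ∀ (n : ℕ) (l : List Int), l.length ≤ n →
    ∀ m : PySem.Dict Int Int, dupA_go l m 1 = dupB_go l m := by
  intro n
  induction n with
  | zero =>
      intro l hl m
      have : l = [] := List.eq_nil_of_length_eq_zero (Nat.le_zero.mp hl)
      subst this; simp [dupA_go, dupB_go]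
  | succ n ih =>
      intro l hl m
      match l with
      | [] => simp [dupA_go, dupB_go]
      | x :: xs =>
        have hsplit : xs.takeWhile (fun y => y == x) ++ xs.dropWhile (fun y => y == x) = xs :=
          List.takeWhile_append_dropWhile
        have hrest_le : (xs.dropWhile (fun y => y == x)).length ≤ n := by
          have := List.length_dropWhile_le (fun y => y == x) xs
          simp only [List.length_cons] at hl; omega
        rw [dupB_go]
        cases hrun : xs.takeWhile (fun y => y == x) with
        | nil =>
            -- empty run: n = 1, no insert on B's side; A's first comparison fails (or list ends)
            rw [hrun] at hsplit
            simp only [List.length_nil, Nat.cast_zero, zero_add]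
            rw [if_neg (by norm_num)]
            cases hxs : xs with
            | nil => subst hxs; simp [dupA_go, dupB_go]
            | cons z t =>
                have hz : ¬ (z == x) = true := by
                  intro hzx
                  have : xs.takeWhile (fun y => y == x) ≠ [] := by
                    simp [hxs, hzx]
                  exact this hrun
                have hzx : z ≠ x := by simpa using hz
                have hxz : x ≠ z := fun h => hzx h.symm
                have hdrop' : List.dropWhile (fun y => y == x) (z :: t) = z :: t := by
                  simp [List.dropWhile, hz]
                rw [hdrop']
                have hstep : dupA_go (x :: z :: t) m 1 = dupA_go (z :: t) m 1 := by
                  simp [dupA_go, hxz]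
                rw [hstep]
                rw [hxs] at hrest_le
                rw [hdrop'] at hrest_le
                exact ih (z :: t) hrest_le m
        | cons r run' =>
            have hmem : ∀ y ∈ xs.takeWhile (fun y => y == x), y = x := by
              intro y hy
              have := List.mem_takeWhile_imp hy
              simpa using this
            have hr : r = x := hmem r (by rw [hrun]; simp)
            have hrun' : ∀ y ∈ run', y = x := fun y hy => hmem y (by rw [hrun]; simp [hy])
            have hxs' : xs = (x :: run') ++ xs.dropWhile (fun y => y == x) := by
              conv_lhs => rw [← hsplit]
              rw [hrun, hr]
            rw [show dupA_go (x :: xs) m 1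
                  = dupA_go (x :: ((x :: run') ++ xs.dropWhile (fun y => y == x))) m 1 by
              rw [← hxs']]
            rw [dupA_run x run' hrun' _ m 1]
            simp only [List.length_cons]
            rw [if_pos (by push_cast; omega)]
            have hval : (1 : Int) + 1 + (run'.length : Int) = ((run'.length : ℕ) + 1 : ℕ) + 1 := by
              push_cast; ring
            rw [hval]
            -- boundary: the element after the run (if any) differs from x
            cases hdrop : xs.dropWhile (fun y => y == x) with
            | nil => simp [dupA_go, dupB_go]
            | cons z t =>
                have hz : ¬ (z == x) = true := by
                  have := List.head?_dropWhile_not (fun y => y == x) xs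
                  rw [hdrop] at this; simpa using this
                have hzx2 : z ≠ x := by simpa using hz
                have hxz : x ≠ z := fun h => hzx2 h.symm
                have hstep : ∀ (m' : PySem.Dict Int Int) (c : Int),
                    dupA_go (x :: z :: t) m' c = dupA_go (z :: t) m' 1 := by
                  intro m' c; simp [dupA_go, hxz]
                rw [hstep]
                exact ih (z :: t) (hdrop ▸ hrest_le) _

-- ===== VERDICT (by name: the statement is the Claim_ definition above) =====
theorem duplicate_sorted_spec : Claim_equal_duplicate_sorted := by
  intro a _
  unfold Spec_duplicate_sorted duplicate_sorted duplicate_sorted_alt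
  rw [dupAB a.length a le_rfl]
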